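-- pv_equiv track=rewrite | github.com/Ben10164/cordiality | codility/L10/Perimeter.py | solution
-- ===== SOURCE A (Python) =====
-- import math
--
-- def solution(N):
--     # Implement your solution here
--     # area is N
--     factors_below_sqrt = []
--     i = 1
--     while i <= math.sqrt(N):
--         if N % i == 0:
--             factors_below_sqrt.append(i)
--         i += 1
--
--     max_factor_below_sqrt = factors_below_sqrt[-1]
--     l = max_factor_below_sqrt
--     w = N / l
--     return int(2 * (w + l))
-- ===== SOURCE B (Python) =====
-- import math
--
--
-- def solution(N):
--     # Top-down trial division: start at isqrt(N) and walk down to the first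
--     # divisor; no list is built.
--     i = math.isqrt(N)
--     while N % i != 0:
--         i -= 1
--     return 2 * (N // i + i)
-- ===== Notes on version B (the rewrite author's own statement) =====
-- stated objective: simpler
-- what changed: Replaces the bottom-up scan of all i up to sqrt(N) that appends every divisor to a list and takes the last one by a top-down scan from isqrt(N) that stops at the first divisor found, building no list.
-- outside the precondition, e.g. on solution(0): A raises IndexError, B raises ZeroDivisionError
import Mathlib
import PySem

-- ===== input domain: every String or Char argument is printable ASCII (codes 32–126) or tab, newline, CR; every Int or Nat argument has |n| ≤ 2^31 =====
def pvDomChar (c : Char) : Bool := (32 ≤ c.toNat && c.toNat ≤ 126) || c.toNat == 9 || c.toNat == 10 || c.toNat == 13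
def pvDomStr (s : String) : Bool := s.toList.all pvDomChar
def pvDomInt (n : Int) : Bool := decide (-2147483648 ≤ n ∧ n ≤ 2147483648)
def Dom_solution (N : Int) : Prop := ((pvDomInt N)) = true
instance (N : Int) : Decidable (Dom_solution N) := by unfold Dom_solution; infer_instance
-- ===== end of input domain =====

-- B changes A's bottom-up divisor-list scan into a top-down scan from isqrt(N)
-- that stops at the first divisor found, building no list (simpler).

-- ===== PORT A =====
-- The while-loop 'i <= math.sqrt(N)': for |N| ≤ 2^31 the correctly rounded
-- double sqrt never crosses an integer boundary, so the guard is exactly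
-- 'i * i ≤ N'; ported that way (exact on Dom_solution).
def aLoop (N i : Int) (acc : List Int) : List Int :=
  if _h : i * i ≤ N then
    aLoop N (i + 1) (if PySem.Int.mod N i = 0 then acc ++ [i] else acc)
  else acc
termination_by (N + 1 - i).toNat
decreasing_by
  have hiN : i ≤ N := by nlinarith [sq_nonneg i]
  omega

def solution (N : Int) : Int :=
  let factors_below_sqrt := aLoop N 1 []
  -- factors_below_sqrt[-1]; raises IndexError on [], excluded by Pre_solution
  let max_factor_below_sqrt := (PySem.List.pyGet? factors_below_sqrt (-1)).getD 0
  let l := max_factor_below_sqrt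
  -- w = N / l is float division; exact here since l divides N and N < 2^53,
  -- so it is ported as floor division, and int(2*(w+l)) = 2*(w+l).
  let w := PySem.Int.floordiv N l
  2 * (w + l)

-- ===== PORT B =====
-- 'while N % i != 0: i -= 1', ported with fuel; fuel i.toNat suffices since the
-- loop stops at i = 1 at the latest (1 divides N).
def bLoop (N i : Int) : Nat → Int
  | 0 => i
  | fuel + 1 => if PySem.Int.mod N i ≠ 0 then bLoop N (i - 1) fuel else i

def solution_alt (N : Int) : Int :=
  let i := Int.sqrt N          -- math.isqrt(N)
  let l := bLoop N i i.toNat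
  2 * (PySem.Int.floordiv N l + l)

-- ===== PRECONDITION & SPEC =====
-- A raises on every N ≤ 0 (ValueError from math.sqrt for N < 0, IndexError on
-- the empty factor list for N = 0); Pre_ excludes exactly those.
def Pre_solution (N : Int) : Prop := 1 ≤ N
instance (N : Int) : Decidable (Pre_solution N) := by unfold Pre_solution; infer_instance
def pvWitness_solution : Int := 12

def Spec_solution (N : Int) (out : Int) : Prop := out = solution_alt N
instance (N : Int) (out : Int) : Decidable (Spec_solution N out) := by unfold Spec_solution; infer_instance

-- ===== CLAIM (what is proved, stated in full; the proofs are below) =====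
def Claim_equal_solution : Prop := ∀ (N : Int), Dom_solution N → Pre_solution N → Spec_solution N (solution N)

-- ===== LEMMAS AND PROOFS =====

theorem aLoop_mem (N : Int) : ∀ i acc, 1 ≤ i → ∀ a,
    (a ∈ aLoop N i acc ↔ a ∈ acc ∨ (i ≤ a ∧ a * a ≤ N ∧ a ∣ N)) := by
  intro i acc
  induction i, acc using aLoop.induct N with
  | case1 i acc hg ih =>
    intro hi a
    by_cases hd : PySem.Int.mod N i = 0
    · have hdvd : i ∣ N := (PySem.Int.mod_eq_zero_iff_dvd N i).mp hd
      rw [dif_pos hd] at ih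
      rw [aLoop, dif_pos hg, if_pos hd, ih (by omega) a]
      simp only [List.mem_append, List.mem_singleton]
      constructor
      · rintro ((h | rfl) | ⟨h1, h2, h3⟩)
        · exact Or.inl h
        · exact Or.inr ⟨le_refl _, hg, hdvd⟩
        · exact Or.inr ⟨by omega, h2, h3⟩
      · rintro (h | ⟨h1, h2, h3⟩)
        · exact Or.inl (Or.inl h)
        · rcases eq_or_lt_of_le h1 with rfl | hlt
          · exact Or.inl (Or.inr rfl)
          · exact Or.inr ⟨by omega, h2, h3⟩
    · have hndvd : ¬ i ∣ N := fun hc => hd ((PySem.Int.mod_eq_zero_iff_dvd N i).mpr hc)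
      rw [dif_neg hd] at ih
      rw [aLoop, dif_pos hg, if_neg hd, ih (by omega) a]
      constructor
      · rintro (h | ⟨h1, h2, h3⟩)
        · exact Or.inl h
        · exact Or.inr ⟨by omega, h2, h3⟩
      · rintro (h | ⟨h1, h2, h3⟩)
        · exact Or.inl h
        · rcases eq_or_lt_of_le h1 with rfl | hlt
          · exact absurd h3 hndvd
          · exact Or.inr ⟨by omega, h2, h3⟩
  | case2 i acc hg =>
    intro hi a
    rw [aLoop, dif_neg hg]
    constructor
    · exact Or.inl
    · rintro (h | ⟨h1, h2, h3⟩)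
      · exact h
      · exact absurd (le_trans (mul_le_mul h1 h1 (by omega) (by omega)) h2) hg

theorem aLoop_sorted (N : Int) : ∀ i acc, acc.Pairwise (· < ·) → (∀ a ∈ acc, a < i) →
    (aLoop N i acc).Pairwise (· < ·) := by
  intro i acc
  induction i, acc using aLoop.induct N with
  | case1 i acc hg ih =>
    intro hp hlt
    by_cases hd : PySem.Int.mod N i = 0
    · rw [dif_pos hd] at ih
      rw [aLoop, dif_pos hg, if_pos hd]
      apply ih
      · rw [List.pairwise_append]
        exact ⟨hp, List.pairwise_singleton _ _, fun a ha b hb => by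
          simp only [List.mem_singleton] at hb; subst hb; exact hlt a ha⟩
      · intro a ha
        rcases List.mem_append.mp ha with h | h
        · exact lt_trans (hlt a h) (by omega)
        · simp only [List.mem_singleton] at h; omega
    · rw [dif_neg hd] at ih
      rw [aLoop, dif_pos hg, if_neg hd]
      exact ih hp (fun a ha => lt_trans (hlt a ha) (by omega))
  | case2 i acc hg =>
    intro hp _
    rw [aLoop, dif_neg hg]
    exact hp

theorem getLastD_mem_or (l : List Int) (d : Int) : l.getLastD d = d ∨ l.getLastD d ∈ l := by
  induction l generalizing d with
  | nil => exact Or.inl rfl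
  | cons x t ih =>
    rw [List.getLastD_cons]
    rcases ih x with h | h
    · exact Or.inr (by rw [h]; exact List.mem_cons_self)
    · exact Or.inr (List.mem_cons_of_mem _ h)

theorem getLastD_max (l : List Int) (d : Int) (hp : l.Pairwise (· < ·)) :
    ∀ a ∈ l, a ≤ l.getLastD d := by
  induction l generalizing d with
  | nil => intro a ha; cases ha
  | cons x t ih =>
    intro a ha
    rw [List.getLastD_cons]
    rcases List.mem_cons.mp ha with rfl | h
    · rcases getLastD_mem_or t a with h | h
      · rw [h]
      · exact le_of_lt ((List.pairwise_cons.mp hp).1 _ h)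
    · exact ih x (List.Pairwise.sublist (List.sublist_cons_self x t) hp) a h

theorem bLoop_spec (N : Int) : ∀ fuel (i : Int), 1 ≤ i → i.toNat ≤ fuel + 1 →
    bLoop N i fuel ∣ N ∧ 1 ≤ bLoop N i fuel ∧ bLoop N i fuel ≤ i ∧
      ∀ d, bLoop N i fuel < d → d ≤ i → ¬ d ∣ N := by
  intro fuel
  induction fuel with
  | zero =>
    intro i hi hf
    have h1 : i = 1 := by omega
    subst h1
    simp only [bLoop]
    exact ⟨one_dvd N, le_refl _, le_refl _, fun d h1 h2 => by omega⟩
  | succ f ih =>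
    intro i hi hf
    by_cases hd : PySem.Int.mod N i = 0
    · have hdvd : i ∣ N := (PySem.Int.mod_eq_zero_iff_dvd N i).mp hd
      simp only [bLoop, hd, ne_eq, not_true_eq_false, if_false]
      exact ⟨hdvd, hi, le_refl _, fun d h1 h2 => by omega⟩
    · have hndvd : ¬ i ∣ N := fun hc => hd ((PySem.Int.mod_eq_zero_iff_dvd N i).mpr hc)
      simp only [bLoop, hd, ne_eq, not_false_eq_true, if_true]
      have hi2 : 2 ≤ i := by
        rcases eq_or_lt_of_le hi with rfl | h
        · exact absurd (one_dvd N) hndvd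
        · omega
      obtain ⟨d1, d2, d3, d4⟩ := ih (i - 1) (by omega) (by omega)
      refine ⟨d1, d2, by omega, fun d h1 h2 => ?_⟩
      rcases eq_or_lt_of_le h2 with rfl | h
      · exact hndvd
      · exact d4 d h1 (by omega)

theorem sq_le_iff_le_sqrt (N a : Int) (hN : 0 ≤ N) (ha : 0 ≤ a) :
    a * a ≤ N ↔ a ≤ Int.sqrt N := by
  rw [Int.sqrt]
  constructor
  · intro h
    have h1 : a.toNat * a.toNat ≤ N.toNat := by
      have e : (↑(a.toNat * a.toNat) : Int) ≤ ↑N.toNat := by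
        push_cast
        rw [Int.toNat_of_nonneg ha, Int.toNat_of_nonneg hN]
        exact h
      exact_mod_cast e
    have h2 : a.toNat ≤ Nat.sqrt N.toNat := Nat.le_sqrt.mpr h1
    omega
  · intro h
    have h1 : a.toNat ≤ Nat.sqrt N.toNat := by omega
    have h2 : a.toNat * a.toNat ≤ N.toNat := Nat.le_sqrt.mp h1
    rw [← Int.toNat_of_nonneg ha, ← Int.toNat_of_nonneg hN]
    exact_mod_cast h2

-- ===== VERDICT (by name: the statement is the Claim_ definition above) =====
theorem solution_spec : Claim_equal_solution := by
  intro N _hDom hN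
  have hN' : (1:Int) ≤ N := hN
  unfold Spec_solution solution solution_alt
  have hN0 : (0:Int) ≤ N := by omega
  set L := aLoop N 1 [] with hL
  set K := Int.sqrt N with hK
  have hK1 : 1 ≤ K := by
    rw [hK, ← sq_le_iff_le_sqrt N 1 hN0 (by norm_num)]
    nlinarith
  -- properties of A's last element
  have hmem := aLoop_mem N 1 [] (le_refl 1)
  have h1L : (1:Int) ∈ L := (hmem 1).mpr (Or.inr ⟨le_refl _, by omega, one_dvd N⟩)
  have hLne : L ≠ [] := fun h => by rw [h] at h1L; cases h1L
  have hsort : L.Pairwise (· < ·) := aLoop_sorted N 1 [] (List.Pairwise.nil) (by intro a ha; cases ha)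
  set lA := L.getLastD 0 with hlA
  have hlAmem : lA ∈ L := by
    rcases getLastD_mem_or L 0 with h | h
    · exfalso
      have h1le := getLastD_max L 0 hsort 1 h1L
      omega
    · exact h
  obtain ⟨hlA1, hlAsq, hlAdvd⟩ : 1 ≤ lA ∧ lA * lA ≤ N ∧ lA ∣ N := by
    rcases (hmem lA).mp hlAmem with h | ⟨h1, h2, h3⟩
    · cases h
    · exact ⟨h1, h2, h3⟩
  have hlAmax : ∀ a ∈ L, a ≤ lA := getLastD_max L 0 hsort
  -- properties of B's result
  obtain ⟨hg1, hg2, hg3, hg4⟩ := bLoop_spec N K.toNat K hK1 (by omega)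
  set g := bLoop N K K.toNat with hg
  -- lA = g
  have hgle : g ≤ lA := by
    apply hlAmax
    exact (hmem g).mpr (Or.inr ⟨hg2, (sq_le_iff_le_sqrt N g hN0 (by omega)).mpr hg3, hg1⟩)
  have hle : lA ≤ g := by
    by_contra hc
    exact hg4 lA (by omega) ((sq_le_iff_le_sqrt N lA hN0 (by omega)).mp hlAsq) hlAdvd
  have heq : lA = g := le_antisymm hle hgle
  simp only [PySem.List.pyGet?_neg_one]
  rw [show L.getLast?.getD 0 = lA by rw [hlA, List.getLastD_eq_getLast?]]
  rw [heq]
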